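-- pv_equiv track=rewrite | github.com/pswaroopk/Data-Structures | LongestSubsequences.py | findLMSequence1
-- ===== SOURCE A (Python) =====
-- def findLMSequence1(array):
--     aux, length = [0]*len(array), [0]*len(array)
--     for i in range(1, len(array) ):
--         for j in range (0, i):
--             if (array[j] <= array[i]) & (length[i] < 1+length[j]):
--                 length[i] = 1 +length[j]
--                 aux[i] = j
--     return aux, length
-- ===== SOURCE B (Python) =====
-- # Dynamic (sparse) segment tree over the value range, storing for each value the
-- # best (length, -index) pair; prefix query per element replaces A's inner O(n) scan.
--
-- def _comb(a, b):
--     if a is None: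
--         return b
--     if b is None:
--         return a
--     return a if a >= b else b
--
--
-- def _best(t):
--     return None if t is None else t[2]
--
--
-- def _upd(t, lo, hi, pos, v):
--     if t is None:
--         t = [None, None, None]
--     if hi - lo == 1:
--         t[2] = _comb(t[2], v)
--         return t
--     mid = (lo + hi) // 2
--     if pos < mid:
--         t[0] = _upd(t[0], lo, mid, pos, v)
--     else:
--         t[1] = _upd(t[1], mid, hi, pos, v)
--     t[2] = _comb(_best(t[0]), _best(t[1]))
--     return t
--
--
-- def _query(t, lo, hi, r):
--     # best over positions p in [lo, hi) with p <= r
--     if t is None or r < lo: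
--         return None
--     if hi - 1 <= r:
--         return t[2]
--     mid = (lo + hi) // 2
--     return _comb(_query(t[0], lo, mid, r), _query(t[1], mid, hi, r))
--
--
-- def findLMSequence1(array):
--     n = len(array)
--     aux, length = [0] * n, [0] * n
--     if n == 0:
--         return aux, length
--     lo, hi = min(array), max(array) + 1
--     t = None
--     for i, x in enumerate(array):
--         b = _query(t, lo, hi, x)
--         if b is not None:
--             length[i] = b[0] + 1
--             aux[i] = -b[1]
--         t = _upd(t, lo, hi, x, (length[i], -i))
--     return aux, length
-- ===== Notes on version B (the rewrite author's own statement) =====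
-- stated objective: faster
-- what changed: Replaces A's O(n^2) nested scan (for each i, scan all j<i) with a dynamic segment tree over the value range that stores the best (length, -index) pair per value, so each element needs one O(log V) prefix query and one O(log V) point update.
import Mathlib
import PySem

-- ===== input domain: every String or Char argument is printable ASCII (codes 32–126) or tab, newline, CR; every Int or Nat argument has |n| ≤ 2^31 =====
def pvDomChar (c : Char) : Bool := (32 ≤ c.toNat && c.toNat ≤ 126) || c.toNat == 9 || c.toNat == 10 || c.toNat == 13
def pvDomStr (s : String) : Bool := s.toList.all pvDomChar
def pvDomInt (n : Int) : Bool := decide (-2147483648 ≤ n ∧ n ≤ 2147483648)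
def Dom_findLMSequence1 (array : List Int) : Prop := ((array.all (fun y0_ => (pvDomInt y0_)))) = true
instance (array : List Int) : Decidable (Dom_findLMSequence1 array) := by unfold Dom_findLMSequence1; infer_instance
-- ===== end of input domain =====

-- B replaces A's O(n^2) inner scans by a dynamic segment tree over the value range
-- (best (length, -index) pair per value, one prefix query per element); measurably faster.

-- ===== PORT A =====
def findLMSequence1 (array : List Int) : List Int × List Int :=
  let n := array.length
  (PySem.List.pyRange 1 (n : Int) 1).foldl (fun st i =>
    (PySem.List.pyRange 0 i 1).foldl (fun st j =>
      if PySem.List.pyGetD array j 0 ≤ PySem.List.pyGetD array i 0 ∧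
         PySem.List.pyGetD st.2 i 0 < 1 + PySem.List.pyGetD st.2 j 0 then
        (PySem.List.pySetD st.1 i j, PySem.List.pySetD st.2 i (1 + PySem.List.pyGetD st.2 j 0))
      else st) st)
    (List.replicate n (0 : Int), List.replicate n (0 : Int))

-- ===== PORT B =====
-- _comb: Python's `a if a >= b else b` on optional (length, -index) pairs (tuple order = lex)
def pvComb (a b : Option (Int × Int)) : Option (Int × Int) :=
  match a, b with
  | none, b => b
  | some x, none => some x
  | some x, some y => if y.1 < x.1 ∨ (x.1 = y.1 ∧ y.2 ≤ x.2) then some x else some y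

-- a segment-tree node [left, right, best]; nil = Python's None
inductive PvTree where
  | nil
  | node (l r : PvTree) (best : Option (Int × Int))
deriving DecidableEq, Repr

-- t[2] (_best), t[0], t[1] — on None/a fresh [None, None, None] all three give None/nil
def pvBest : PvTree → Option (Int × Int)
  | .nil => none
  | .node _ _ b => b

def pvLeft : PvTree → PvTree
  | .nil => .nil
  | .node l _ _ => l

def pvRight : PvTree → PvTree
  | .nil => .nil
  | .node _ r _ => r

-- _upd; base case `hi - lo ≤ 1` is Python's `hi - lo == 1` (on hi - lo ≤ 0 Python never
-- terminates; such calls never occur: every call in B has lo ≤ pos < hi)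
def pvUpd (t : PvTree) (lo hi pos : Int) (v : Int × Int) : PvTree :=
  if hi - lo ≤ 1 then .node (pvLeft t) (pvRight t) (pvComb (pvBest t) (some v))
  else
    let mid := PySem.Int.floordiv (lo + hi) 2
    if pos < mid then
      let l' := pvUpd (pvLeft t) lo mid pos v
      .node l' (pvRight t) (pvComb (pvBest l') (pvBest (pvRight t)))
    else
      let r' := pvUpd (pvRight t) mid hi pos v
      .node (pvLeft t) r' (pvComb (pvBest (pvLeft t)) (pvBest r'))
termination_by (hi - lo).toNat
decreasing_by
  · have h2 := PySem.Int.floordiv_eq_ediv_of_pos (a := lo + hi) (b := 2) (by omega)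
    omega
  · have h2 := PySem.Int.floordiv_eq_ediv_of_pos (a := lo + hi) (b := 2) (by omega)
    omega

-- _query: best over inserted positions p in [lo, hi) with p ≤ q
def pvQuery : PvTree → Int → Int → Int → Option (Int × Int)
  | .nil, _, _, _ => none
  | .node l r b, lo, hi, q =>
    if q < lo then none
    else if hi - 1 ≤ q then b
    else
      let mid := PySem.Int.floordiv (lo + hi) 2
      pvComb (pvQuery l lo mid q) (pvQuery r mid hi q)

def findLMSequence1_alt (array : List Int) : List Int × List Int :=
  let n := array.length
  let aux := List.replicate n (0 : Int)
  let length := List.replicate n (0 : Int)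
  if n = 0 then (aux, length)
  else
    let lo := (PySem.List.min? array (fun x => x)).getD 0   -- min(array); array nonempty here
    let hi := (PySem.List.max? array (fun x => x)).getD 0 + 1
    let res := (PySem.List.enumerate array 0).foldl (fun st p =>
      let i := p.1
      let x := p.2
      let b := pvQuery st.2 lo hi x
      let st' : List Int × List Int :=
        match b with
        | none => st.1
        | some q => (PySem.List.pySetD st.1.1 i (-q.2), PySem.List.pySetD st.1.2 i (q.1 + 1))
      (st', pvUpd st.2 lo hi x (PySem.List.pyGetD st'.2 i 0, -i))) ((aux, length), PvTree.nil)
    res.1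

-- ===== PRECONDITION & SPEC =====
def Spec_findLMSequence1 (array : List Int) (out : List Int × List Int) : Prop := out = findLMSequence1_alt array
instance (array : List Int) (out : List Int × List Int) : Decidable (Spec_findLMSequence1 array out) := by unfold Spec_findLMSequence1; infer_instance

-- ===== CLAIM (what is proved, stated in full; the proofs are below) =====
def Claim_equal_findLMSequence1 : Prop := ∀ (array : List Int), Dom_findLMSequence1 array → Spec_findLMSequence1 array (findLMSequence1 array)

-- ===== LEMMAS AND PROOFS =====

-- the common specification: pvBigL i / pvBigA i are the final length[i] / aux[i]
def pvBigL (xs : List Int) (i : Nat) : Int :=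
  match (List.range i).attach.foldl (fun acc j =>
      if xs.getD j.1 0 ≤ xs.getD i 0 then pvComb acc (some (pvBigL xs j.1, -(j.1 : Int))) else acc)
      none with
  | none => 0
  | some p => p.1 + 1
termination_by i
decreasing_by exact List.mem_range.mp j.2

-- the best candidate among indices j < m whose value is ≤ r
def pvPartialR (xs : List Int) (r : Int) (m : Nat) : Option (Int × Int) :=
  (List.range m).foldl (fun acc j =>
    if xs.getD j 0 ≤ r then pvComb acc (some (pvBigL xs j, -(j : Int))) else acc) none

def pvBestF (xs : List Int) (i : Nat) : Option (Int × Int) := pvPartialR xs (xs.getD i 0) i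

def pvBigA (xs : List Int) (i : Nat) : Int :=
  match pvBestF xs i with | none => 0 | some p => -p.2

-- the state of both loops after the first k indices have been processed
def pvState (xs : List Int) (k : Nat) : List Int × List Int :=
  ((List.range xs.length).map (fun j => if j < k then pvBigA xs j else 0),
   (List.range xs.length).map (fun j => if j < k then pvBigL xs j else 0))

lemma pvBigL_eq (xs : List Int) (i : Nat) :
    pvBigL xs i = match pvBestF xs i with | none => 0 | some p => p.1 + 1 := by
  rw [pvBigL, pvBestF, pvPartialR,
    List.foldl_subtype (g := fun acc j =>
      if xs.getD j 0 ≤ xs.getD i 0 then pvComb acc (some (pvBigL xs j, -(j : Int))) else acc)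
      (fun b x h => rfl), List.unattach_attach]

lemma comb_assoc (a b c : Option (Int × Int)) :
    pvComb (pvComb a b) c = pvComb a (pvComb b c) := by
  rcases a with _ | ⟨a1, a2⟩ <;> rcases b with _ | ⟨b1, b2⟩ <;> rcases c with _ | ⟨c1, c2⟩ <;>
  simp only [pvComb] <;> split_ifs <;> simp only [pvComb] <;> split_ifs <;>
    first
      | rfl
      | (simp only [Option.some.injEq, Prod.mk.injEq]; omega)
      | omega

lemma comb_comm (a b : Option (Int × Int)) : pvComb a b = pvComb b a := by
  rcases a with _ | ⟨a1, a2⟩ <;> rcases b with _ | ⟨b1, b2⟩ <;>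
  simp only [pvComb] <;> split_ifs <;>
    first
      | rfl
      | (simp only [Option.some.injEq, Prod.mk.injEq]; omega)
      | omega

lemma comb_right_comm (a b c : Option (Int × Int)) :
    pvComb (pvComb a b) c = pvComb (pvComb a c) b := by
  rw [comb_assoc, comb_assoc, comb_comm b c]

lemma comb_cases (a b : Option (Int × Int)) : pvComb a b = a ∨ pvComb a b = b := by
  rcases a with _ | a
  · exact Or.inr rfl
  · rcases b with _ | b
    · exact Or.inl rfl
    · simp only [pvComb]
      split_ifs
      · exact Or.inl rfl
      · exact Or.inr rfl

-- one more step of the candidate fold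
lemma pvPartialR_succ (xs : List Int) (r : Int) (m : Nat) :
    pvPartialR xs r (m + 1) =
      if xs.getD m 0 ≤ r then pvComb (pvPartialR xs r m) (some (pvBigL xs m, -(m : Int)))
      else pvPartialR xs r m := by
  rw [pvPartialR, List.range_succ, List.foldl_append]
  rfl

-- a some-result of the candidate fold is one of the candidates
lemma pvPartialR_shape (xs : List Int) (r : Int) (m : Nat) :
    ∀ p, pvPartialR xs r m = some p →
      ∃ j < m, p = (pvBigL xs j, -(j : Int)) ∧ xs.getD j 0 ≤ r := by
  induction m with
  | zero => intro p h; simp [pvPartialR] at h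
  | succ m ih =>
    intro p h
    rw [pvPartialR_succ] at h
    split_ifs at h with hle
    · rcases comb_cases (pvPartialR xs r m) (some (pvBigL xs m, -(m : Int))) with hc | hc
      · rw [hc] at h
        obtain ⟨j, hj, hp⟩ := ih p h
        exact ⟨j, by omega, hp⟩
      · rw [hc] at h
        exact ⟨m, by omega, (Option.some.injEq _ _ ▸ h).symm ▸ ⟨rfl, hle⟩⟩
    · obtain ⟨j, hj, hp⟩ := ih p h
      exact ⟨j, by omega, hp⟩

lemma pvBigL_nonneg (xs : List Int) (i : Nat) : 0 ≤ pvBigL xs i := by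
  induction i using Nat.strong_induction_on with
  | _ i ih =>
    rw [pvBigL_eq]
    rcases h : pvBestF xs i with _ | p
    · simp
    · obtain ⟨j, hj, hp, _⟩ := pvPartialR_shape xs (xs.getD i 0) i p h
      have := ih j hj
      simp [hp]
      linarith

-- the segment-tree shape invariant: caches are combs of the children
def pvInv : PvTree → Int → Int → Prop
  | .nil, _, _ => True
  | .node l r b, lo, hi =>
    if hi - lo ≤ 1 then l = .nil ∧ r = .nil
    else pvInv l lo (PySem.Int.floordiv (lo + hi) 2) ∧
         pvInv r (PySem.Int.floordiv (lo + hi) 2) hi ∧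
         b = pvComb (pvBest l) (pvBest r)

lemma pvUpd_nil (lo hi pos : Int) (v : Int × Int) :
    pvUpd .nil lo hi pos v = pvUpd (.node .nil .nil none) lo hi pos v := by
  rw [pvUpd, pvUpd]
  rfl

lemma pvQuery_nil_node (lo hi q : Int) :
    pvQuery (.node .nil .nil none) lo hi q = pvQuery .nil lo hi q := by
  simp only [pvQuery]
  split_ifs <;> rfl

lemma pvInv_nil_node (lo hi : Int) : pvInv (.node .nil .nil none) lo hi := by
  rw [pvInv]
  split_ifs
  · exact ⟨rfl, rfl⟩
  · exact ⟨trivial, trivial, rfl⟩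

lemma pvBest_node (l r : PvTree) (b : Option (Int × Int)) : pvBest (.node l r b) = b := rfl
lemma pvLeft_node (l r : PvTree) (b : Option (Int × Int)) : pvLeft (.node l r b) = l := rfl
lemma pvRight_node (l r : PvTree) (b : Option (Int × Int)) : pvRight (.node l r b) = r := rfl

-- master lemma: one update's effect on the invariant, the cache and every prefix query
lemma upd_master : ∀ (N : Nat) (t : PvTree) (lo hi pos : Int) (v : Int × Int),
    (hi - lo).toNat = N → pvInv t lo hi → 1 ≤ hi - lo → lo ≤ pos → pos < hi →
    pvInv (pvUpd t lo hi pos v) lo hi ∧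
    pvBest (pvUpd t lo hi pos v) = pvComb (pvBest t) (some v) ∧
    ∀ q, pvQuery (pvUpd t lo hi pos v) lo hi q =
      if pos ≤ q then pvComb (pvQuery t lo hi q) (some v) else pvQuery t lo hi q := by
  intro N
  induction N using Nat.strong_induction_on with
  | _ N IH =>
    intro t lo hi pos v hN hInv h1 hlo hhi
    have main : ∀ l0 r0 b0, pvInv (PvTree.node l0 r0 b0) lo hi →
        pvInv (pvUpd (.node l0 r0 b0) lo hi pos v) lo hi ∧
        pvBest (pvUpd (.node l0 r0 b0) lo hi pos v) = pvComb b0 (some v) ∧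
        ∀ q, pvQuery (pvUpd (.node l0 r0 b0) lo hi pos v) lo hi q =
          if pos ≤ q then pvComb (pvQuery (.node l0 r0 b0) lo hi q) (some v)
          else pvQuery (.node l0 r0 b0) lo hi q := by
      intro l0 r0 b0 hInv0
      by_cases hleaf : hi - lo ≤ 1
      · -- leaf interval [lo, lo+1): pos = lo
        have hpos : pos = lo := by omega
        rw [pvInv, if_pos hleaf] at hInv0
        obtain ⟨hl0, hr0⟩ := hInv0
        rw [pvUpd, if_pos hleaf]
        simp only [pvLeft_node, pvRight_node, pvBest_node]
        refine ⟨?_, trivial, ?_⟩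
        · rw [pvInv, if_pos hleaf]
          exact ⟨hl0, hr0⟩
        · intro q
          simp only [pvQuery]
          split_ifs <;> first | rfl | (exfalso; omega)
      · -- inner node
        have hmid2 : PySem.Int.floordiv (lo + hi) 2 = (lo + hi) / 2 :=
          PySem.Int.floordiv_eq_ediv_of_pos (by omega)
        rw [pvInv, if_neg hleaf] at hInv0
        obtain ⟨Invl, Invr, hb⟩ := hInv0
        rw [pvUpd, if_neg hleaf]
        simp only [pvLeft_node, pvRight_node]
        by_cases hp : pos < PySem.Int.floordiv (lo + hi) 2
        · obtain ⟨IH1, IH2, IH3⟩ :=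
            IH ((PySem.Int.floordiv (lo + hi) 2) - lo).toNat (by omega) l0 lo
              (PySem.Int.floordiv (lo + hi) 2) pos v rfl Invl (by omega) hlo hp
          rw [if_pos hp]
          refine ⟨?_, ?_, ?_⟩
          · rw [pvInv, if_neg hleaf]
            exact ⟨IH1, Invr, rfl⟩
          · simp only [pvBest_node]
            rw [IH2, hb, comb_right_comm]
          · intro q
            simp only [pvQuery]
            split_ifs <;>
              first
                | rfl
                | (exfalso; omega)
                | (rw [IH2, hb, comb_right_comm])
                | (rw [IH3 q, if_pos (by omega), comb_right_comm])
                | (rw [IH3 q, if_neg (by omega)])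
        · obtain ⟨IH1, IH2, IH3⟩ :=
            IH (hi - (PySem.Int.floordiv (lo + hi) 2)).toNat (by omega) r0
              (PySem.Int.floordiv (lo + hi) 2) hi pos v rfl Invr (by omega) (by omega) hhi
          rw [if_neg hp]
          refine ⟨?_, ?_, ?_⟩
          · rw [pvInv, if_neg hleaf]
            exact ⟨Invl, IH1, rfl⟩
          · simp only [pvBest_node]
            rw [IH2, hb, comb_assoc]
          · intro q
            simp only [pvQuery]
            split_ifs <;>
              first
                | rfl
                | (exfalso; omega)
                | (rw [IH2, hb, comb_assoc])
                | (rw [IH3 q, if_pos (by omega), comb_assoc])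
                | (rw [IH3 q, if_neg (by omega)])
    rcases t with _ | ⟨l0, r0, b0⟩
    · rw [pvUpd_nil]
      obtain ⟨g1, g2, g3⟩ := main .nil .nil none (pvInv_nil_node lo hi)
      refine ⟨g1, g2, ?_⟩
      intro q
      rw [g3 q, pvQuery_nil_node]
    · exact main l0 r0 b0 hInv

-- ===== A = spec =====
-- A's inner-loop body, named
def stepA (xs : List Int) (i : Int) : (List Int × List Int) → Int → (List Int × List Int) :=
  fun st j =>
    if PySem.List.pyGetD xs j 0 ≤ PySem.List.pyGetD xs i 0 ∧
       PySem.List.pyGetD st.2 i 0 < 1 + PySem.List.pyGetD st.2 j 0 then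
      (PySem.List.pySetD st.1 i j, PySem.List.pySetD st.2 i (1 + PySem.List.pyGetD st.2 j 0))
    else st

-- the loop state for index k once the candidate fold has produced o
def pvApply (xs : List Int) (k : Nat) : Option (Int × Int) → List Int × List Int
  | none => pvState xs k
  | some p => ((pvState xs k).1.set k (-p.2), (pvState xs k).2.set k (p.1 + 1))

lemma getD_set_self (l : List Int) (k : Nat) (v : Int) (h : k < l.length) :
    (l.set k v).getD k 0 = v := by
  simp [List.getD, h]

lemma getD_set_other (l : List Int) (k j : Nat) (v : Int) (h : k ≠ j) :
    (l.set k v).getD j 0 = l.getD j 0 := by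
  simp [List.getD, List.getElem?_set_ne h]

lemma state1_len (xs : List Int) (k : Nat) : (pvState xs k).1.length = xs.length := by
  simp [pvState]

lemma state2_len (xs : List Int) (k : Nat) : (pvState xs k).2.length = xs.length := by
  simp [pvState]

lemma state1_getD (xs : List Int) (k j : Nat) (h : j < xs.length) :
    (pvState xs k).1.getD j 0 = if j < k then pvBigA xs j else 0 :=
  PySem.List.getD_map_range _ _ _ _ h

lemma state2_getD (xs : List Int) (k j : Nat) (h : j < xs.length) :
    (pvState xs k).2.getD j 0 = if j < k then pvBigL xs j else 0 :=
  PySem.List.getD_map_range _ _ _ _ h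

lemma innerA (xs : List Int) (k : Nat) (hk : k < xs.length) :
    ∀ m, m ≤ k →
      (List.range m).foldl (fun st (j : Nat) => stepA xs (k : Int) st (j : Int)) (pvState xs k)
        = pvApply xs k (pvPartialR xs (xs.getD k 0) m) := by
  intro m
  induction m with
  | zero => intro _; rfl
  | succ m ih =>
    intro hm
    rw [List.range_succ, List.foldl_append, ih (by omega), pvPartialR_succ]
    have hmk : m < k := by omega
    have hL := pvBigL_nonneg xs m
    rcases hP : pvPartialR xs (xs.getD k 0) m with _ | p
    · -- nothing accepted yet: length[k] still reads 0
      simp only [pvApply, List.foldl_cons, List.foldl_nil, stepA,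
        PySem.List.pyGetD_natCast, PySem.List.pySetD_natCast]
      rw [state2_getD xs k k hk, state2_getD xs k m (by omega), if_neg (Nat.lt_irrefl k),
        if_pos hmk]
      by_cases hc : xs.getD m 0 ≤ xs.getD k 0
      · have hcond : xs.getD m 0 ≤ xs.getD k 0 ∧ (0 : Int) < 1 + pvBigL xs m :=
          ⟨hc, by linarith⟩
        rw [if_pos hcond, if_pos hc]
        simp only [pvComb, pvApply, neg_neg, Prod.mk.injEq]
        constructor
        · trivial
        · congr 1
          omega
      · have hcond : ¬ (xs.getD m 0 ≤ xs.getD k 0 ∧ (0 : Int) < 1 + pvBigL xs m) :=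
          fun h => hc h.1
        rw [if_neg hcond, if_neg hc]
    · obtain ⟨j', hj', hpj, _⟩ := pvPartialR_shape xs (xs.getD k 0) m p hP
      have hp2 : -(m : Int) < p.2 := by
        rw [hpj]
        simp
        omega
      simp only [pvApply, List.foldl_cons, List.foldl_nil, stepA,
        PySem.List.pyGetD_natCast, PySem.List.pySetD_natCast]
      rw [getD_set_self _ _ _ (by rw [state2_len]; exact hk),
        getD_set_other _ _ _ _ (by omega), state2_getD xs k m (by omega), if_pos hmk]
      by_cases hc : xs.getD m 0 ≤ xs.getD k 0
      · rw [if_pos hc]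
        by_cases hlt : p.1 < pvBigL xs m
        · have hcond : xs.getD m 0 ≤ xs.getD k 0 ∧ p.1 + 1 < 1 + pvBigL xs m :=
            ⟨hc, by linarith⟩
          rw [if_pos hcond]
          simp only [pvComb]
          have hcmb : ¬ (pvBigL xs m < p.1 ∨ (p.1 = pvBigL xs m ∧ -(m : Int) ≤ p.2)) := by
            push_neg
            refine ⟨by linarith, fun h => absurd h (by omega)⟩
          rw [if_neg hcmb]
          simp only [pvApply, List.set_set, neg_neg, Prod.mk.injEq]
          constructor
          · trivial
          · congr 1
            omega
        · have hcond : ¬ (xs.getD m 0 ≤ xs.getD k 0 ∧ p.1 + 1 < 1 + pvBigL xs m) :=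
            fun h => hlt (by linarith [h.2])
          rw [if_neg hcond]
          simp only [pvComb]
          have hcmb : pvBigL xs m < p.1 ∨ (p.1 = pvBigL xs m ∧ -(m : Int) ≤ p.2) := by
            rcases lt_or_ge p.1 (pvBigL xs m) with h | h
            · exact absurd h hlt
            · rcases eq_or_lt_of_le h with h' | h'
              · exact Or.inr ⟨h'.symm, le_of_lt hp2⟩
              · exact Or.inl h'
          rw [if_pos hcmb]
      · have hcond : ¬ (xs.getD m 0 ≤ xs.getD k 0 ∧ p.1 + 1 < 1 + pvBigL xs m) :=
          fun h => hc h.1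
        rw [if_neg hcond, if_neg hc]

lemma applyA_eq_state_succ (xs : List Int) (k : Nat) (hk : k < xs.length) :
    pvApply xs k (pvBestF xs k) = pvState xs (k + 1) := by
  have e2 : ∀ v, v = pvBigL xs k →
      ((pvState xs k).2.set k v) = (pvState xs (k + 1)).2 := by
    intro v hv
    apply List.ext_getElem
    · simp [pvState]
    · intro j h1 h2
      have hj : j < xs.length := by simpa [pvState] using h2
      by_cases hjk : j = k
      · subst hjk
        rw [List.getElem_set_self (by simpa [pvState] using hk)]
        simp only [pvState, List.getElem_map, List.getElem_range]
        rw [if_pos (Nat.lt_succ_self _)]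
        exact hv
      · rw [List.getElem_set_ne (by omega)]
        simp only [pvState, List.getElem_map, List.getElem_range]
        by_cases h : j < k
        · rw [if_pos h, if_pos (by omega)]
        · rw [if_neg h, if_neg (by omega)]
  have e1 : ∀ v, v = pvBigA xs k →
      ((pvState xs k).1.set k v) = (pvState xs (k + 1)).1 := by
    intro v hv
    apply List.ext_getElem
    · simp [pvState]
    · intro j h1 h2
      have hj : j < xs.length := by simpa [pvState] using h2
      by_cases hjk : j = k
      · subst hjk
        rw [List.getElem_set_self (by simpa [pvState] using hk)]
        simp only [pvState, List.getElem_map, List.getElem_range]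
        rw [if_pos (Nat.lt_succ_self _)]
        exact hv
      · rw [List.getElem_set_ne (by omega)]
        simp only [pvState, List.getElem_map, List.getElem_range]
        by_cases h : j < k
        · rw [if_pos h, if_pos (by omega)]
        · rw [if_neg h, if_neg (by omega)]
  have unchanged : ∀ (L : List Int), L.length = xs.length → L.getD k 0 = 0 →
      L = L.set k 0 := by
    intro L hlen hval
    apply List.ext_getElem
    · simp
    · intro j h1 h2
      by_cases hjk : j = k
      · subst hjk
        rw [List.getElem_set_self]
        have : L.getD j 0 = L[j] := List.getD_eq_getElem L 0 h1
        rw [← this, hval]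
      · rw [List.getElem_set_ne (by omega)]
  rcases h : pvBestF xs k with _ | p
  · -- no candidate: length[k] = aux[k] = 0 and the state is unchanged
    simp only [pvApply]
    have l2 := e2 0 (by rw [pvBigL_eq, h])
    have l1 := e1 0 (by rw [pvBigA, h])
    refine Prod.ext ?_ ?_
    · rw [← l1]
      exact unchanged _ (state1_len xs k)
        (by rw [state1_getD xs k k hk, if_neg (Nat.lt_irrefl k)])
    · rw [← l2]
      exact unchanged _ (state2_len xs k)
        (by rw [state2_getD xs k k hk, if_neg (Nat.lt_irrefl k)])
  · simp only [pvApply]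
    rw [e1 (-p.2) (by rw [pvBigA, h]), e2 (p.1 + 1) (by rw [pvBigL_eq, h])]

lemma state_zero (xs : List Int) :
    pvState xs 0 = (List.replicate xs.length (0 : Int), List.replicate xs.length (0 : Int)) := by
  simp only [pvState]
  refine Prod.ext ?_ ?_ <;>
    · apply List.ext_getElem
      · simp
      · intro j h1 h2
        simp

lemma outerA (xs : List Int) :
    ∀ K, K ≤ xs.length →
      (PySem.List.pyRange 1 (K : Int) 1).foldl
        (fun st i => (PySem.List.pyRange 0 i 1).foldl (stepA xs i) st) (pvState xs 0)
        = pvState xs K := by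
  intro K
  induction K with
  | zero => intro _; rw [PySem.List.pyRange_one_eq_nil (by omega)]; rfl
  | succ K ih =>
    intro hK
    rcases Nat.eq_zero_or_pos K with h0 | h0
    · subst h0
      rw [PySem.List.pyRange_one_eq_nil (by omega)]
      have := applyA_eq_state_succ xs 0 (by omega)
      rw [← this, pvBestF]
      rfl
    · have : ((K : Nat) + 1 : Int) = (K : Int) + 1 := by push_cast; ring
      rw [show ((K + 1 : Nat) : Int) = (K : Int) + 1 by push_cast; ring,
        PySem.List.pyRange_one_succ_right (by omega), List.foldl_append, ih (by omega)]
      simp only [List.foldl_cons, List.foldl_nil]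
      rw [show ((K : Nat) : Int) = ((K : Nat) : Int) from rfl]
      rw [PySem.List.pyRange_zero_natCast K, List.foldl_map,
        innerA xs K (by omega) K le_rfl, ← pvBestF]
      exact applyA_eq_state_succ xs K (by omega)

lemma portA_eq_spec (xs : List Int) : findLMSequence1 xs = pvState xs xs.length := by
  show (PySem.List.pyRange 1 (xs.length : Int) 1).foldl
      (fun st i => (PySem.List.pyRange 0 i 1).foldl (stepA xs i) st)
      (List.replicate xs.length 0, List.replicate xs.length 0) = pvState xs xs.length
  rw [← state_zero]
  exact outerA xs xs.length le_rfl

-- ===== B = spec =====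
-- B's loop body, named
def stepB (lo hi : Int) : ((List Int × List Int) × PvTree) → (Int × Int) → ((List Int × List Int) × PvTree) :=
  fun st p =>
    let i := p.1
    let x := p.2
    let b := pvQuery st.2 lo hi x
    let st' : List Int × List Int :=
      match b with
      | none => st.1
      | some q => (PySem.List.pySetD st.1.1 i (-q.2), PySem.List.pySetD st.1.2 i (q.1 + 1))
    (st', pvUpd st.2 lo hi x (PySem.List.pyGetD st'.2 i 0, -i))

lemma alt_eq (xs : List Int) :
    findLMSequence1_alt xs =
      if xs.length = 0 then (List.replicate xs.length (0 : Int), List.replicate xs.length (0 : Int))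
      else ((PySem.List.enumerate xs 0).foldl
        (stepB ((PySem.List.min? xs (fun x => x)).getD 0) ((PySem.List.max? xs (fun x => x)).getD 0 + 1))
        ((List.replicate xs.length (0 : Int), List.replicate xs.length (0 : Int)), PvTree.nil)).1 := rfl

lemma innerB (xs : List Int) (mn mx : Int)
    (hbound : ∀ x ∈ xs, mn ≤ x ∧ x ≤ mx) (hne : xs ≠ []) :
    ∀ K, K ≤ xs.length →
      ((List.range K).foldl
          (fun st (j : Nat) => stepB mn (mx + 1) st ((j : Int), PySem.List.pyGetD xs (j : Int) 0))
          ((pvState xs 0, PvTree.nil))).1 = pvState xs K ∧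
      pvInv ((List.range K).foldl
          (fun st (j : Nat) => stepB mn (mx + 1) st ((j : Int), PySem.List.pyGetD xs (j : Int) 0))
          ((pvState xs 0, PvTree.nil))).2 mn (mx + 1) ∧
      ∀ q, pvQuery ((List.range K).foldl
          (fun st (j : Nat) => stepB mn (mx + 1) st ((j : Int), PySem.List.pyGetD xs (j : Int) 0))
          ((pvState xs 0, PvTree.nil))).2 mn (mx + 1) q = pvPartialR xs q K := by
  intro K
  induction K with
  | zero =>
    intro _
    refine ⟨rfl, trivial, fun q => rfl⟩
  | succ K ihK =>
    intro hK
    obtain ⟨ih1, ih2, ih3⟩ := ihK (by omega)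
    have hKn : K < xs.length := by omega
    have hx : xs.getD K 0 ∈ xs := by
      rw [List.getD_eq_getElem xs 0 hKn]
      exact List.getElem_mem hKn
    obtain ⟨hxlo, hxhi⟩ := hbound _ hx
    rw [List.range_succ, List.foldl_append, List.foldl_cons, List.foldl_nil]
    set r := (List.range K).foldl
        (fun st (j : Nat) => stepB mn (mx + 1) st ((j : Int), PySem.List.pyGetD xs (j : Int) 0))
        ((pvState xs 0, PvTree.nil)) with hr
    -- the query made at step K returns exactly the best candidate for index K
    have hq : pvQuery r.2 mn (mx + 1) (PySem.List.pyGetD xs (K : Int) 0) = pvBestF xs K := by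
      rw [PySem.List.pyGetD_natCast]
      exact ih3 (xs.getD K 0)
    have hstep : stepB mn (mx + 1) r ((K : Int), PySem.List.pyGetD xs (K : Int) 0)
        = ((pvApply xs K (pvBestF xs K)),
           pvUpd r.2 mn (mx + 1) (PySem.List.pyGetD xs (K : Int) 0) (pvBigL xs K, -(K : Int))) := by
      simp only [stepB, hq, ih1]
      rcases hB : pvBestF xs K with _ | p
      · simp only [pvApply, PySem.List.pyGetD_natCast]
        rw [state2_getD xs K K hKn, if_neg (Nat.lt_irrefl K)]
        rw [show (0 : Int) = pvBigL xs K by rw [pvBigL_eq, hB]]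
      · simp only [pvApply, PySem.List.pySetD_natCast, PySem.List.pyGetD_natCast]
        rw [getD_set_self _ _ _ (by rw [state2_len]; exact hKn)]
        rw [show p.1 + 1 = pvBigL xs K by rw [pvBigL_eq, hB]]
    rw [hstep]
    have hmaster := upd_master ((mx + 1) - mn).toNat r.2 mn (mx + 1)
      (PySem.List.pyGetD xs (K : Int) 0) (pvBigL xs K, -(K : Int)) rfl ih2
      (by omega)
      (by rw [PySem.List.pyGetD_natCast]; omega)
      (by rw [PySem.List.pyGetD_natCast]; omega)
    refine ⟨applyA_eq_state_succ xs K hKn, hmaster.1, ?_⟩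
    intro q
    rw [hmaster.2.2 q, ih3 q, pvPartialR_succ, PySem.List.pyGetD_natCast]

lemma portB_eq_spec (xs : List Int) : findLMSequence1_alt xs = pvState xs xs.length := by
  rcases eq_or_ne xs.length 0 with h0 | h0
  · have hnil : xs = [] := List.eq_nil_of_length_eq_zero h0
    subst hnil
    rfl
  · have hne : xs ≠ [] := fun h => h0 (by simp [h])
    obtain ⟨mn, hmn⟩ : ∃ mn, PySem.List.min? xs (fun x => x) = some mn := by
      rcases h : PySem.List.min? xs (fun x => x) with _ | mn
      · exact absurd ((PySem.List.min?_eq_none_iff xs _).mp h) hne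
      · exact ⟨mn, rfl⟩
    obtain ⟨mx, hmx⟩ : ∃ mx, PySem.List.max? xs (fun x => x) = some mx := by
      rcases h : PySem.List.max? xs (fun x => x) with _ | mx
      · exact absurd ((PySem.List.max?_eq_none_iff xs _).mp h) hne
      · exact ⟨mx, rfl⟩
    have hbound : ∀ x ∈ xs, mn ≤ x ∧ x ≤ mx := fun x hxm =>
      ⟨PySem.List.min?_isMin hmn x hxm, PySem.List.max?_isMax hmx x hxm⟩
    rw [alt_eq, if_neg h0, hmn, hmx]
    simp only [Option.getD_some]
    rw [PySem.List.enumerate_eq_map_pyRange xs 0]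
    rw [show PySem.List.len xs = (xs.length : Int) from PySem.List.len_eq xs]
    rw [PySem.List.pyRange_zero_natCast xs.length, List.map_map, List.foldl_map]
    rw [← state_zero]
    exact (innerB xs mn mx hbound hne xs.length le_rfl).1

-- ===== VERDICT (by name: the statement is the Claim_ definition above) =====
theorem findLMSequence1_spec : Claim_equal_findLMSequence1 := by
  intro array _
  unfold Spec_findLMSequence1
  rw [portA_eq_spec, portB_eq_spec]
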